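-- pv_equiv track=rewrite | github.com/pypi-data/pypi-mirror-404 | packages/miesc/miesc-5.0.1-py3-none-any.whl/src/benchmark/benchmark_runner.py | _categories_related
-- ===== SOURCE A (Python) =====
-- def _categories_related(cat1: str, cat2: str) -> bool:
--     """Check if two categories are related."""
--     related_groups = [
--         {"reentrancy", "unchecked_low_level_calls"},
--         {"access_control", "tx-origin"},
--         {"bad_randomness", "time_manipulation"},
--         {"oracle_manipulation", "price_manipulation", "flash_loan"},
--     ]
--
--     for group in related_groups:
--         if cat1 in group and cat2 in group:
--             return True
--     return False
-- ===== SOURCE B (Python) =====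
-- def _categories_related(cat1: str, cat2: str) -> bool:
--     """Check if two categories are related."""
--     groups = [
--         ("reentrancy", "unchecked_low_level_calls"),
--         ("access_control", "tx-origin"),
--         ("bad_randomness", "time_manipulation"),
--         ("oracle_manipulation", "price_manipulation", "flash_loan"),
--     ]
--     cat_to_group = {}
--     for gid, group in enumerate(groups):
--         for c in group:
--             cat_to_group[c] = gid
--     g1 = cat_to_group.get(cat1)
--     return g1 is not None and g1 == cat_to_group.get(cat2)
-- ===== Notes on version B (the rewrite author's own statement) =====
-- stated objective: alternative
-- what changed: Replaced the per-group double-membership scan loop with a flat category-to-group-id index built once, so the check becomes two lookups and an id comparison instead of iterating over groups.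
import Mathlib
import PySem

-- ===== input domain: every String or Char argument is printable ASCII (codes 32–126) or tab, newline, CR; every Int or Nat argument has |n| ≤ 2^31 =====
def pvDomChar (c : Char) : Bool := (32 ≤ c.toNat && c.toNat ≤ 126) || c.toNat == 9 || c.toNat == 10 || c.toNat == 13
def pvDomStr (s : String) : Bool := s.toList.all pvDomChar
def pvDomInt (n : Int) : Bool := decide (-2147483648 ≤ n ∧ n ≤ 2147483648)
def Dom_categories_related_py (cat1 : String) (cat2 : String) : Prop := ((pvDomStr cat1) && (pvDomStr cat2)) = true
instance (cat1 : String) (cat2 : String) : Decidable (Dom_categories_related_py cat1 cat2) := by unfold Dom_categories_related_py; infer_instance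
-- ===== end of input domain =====

-- B replaces A's per-group double-membership scan loop with a flat category→group-id index
-- built once, then two lookups and an id comparison (objective: alternative data structure).

-- ===== PORT A =====
-- A's related_groups literal: a list of Python sets
def pvRelatedGroups : List (PySem.Set String) :=
  [PySem.Set.ofList ["reentrancy", "unchecked_low_level_calls"],
   PySem.Set.ofList ["access_control", "tx-origin"],
   PySem.Set.ofList ["bad_randomness", "time_manipulation"],
   PySem.Set.ofList ["oracle_manipulation", "price_manipulation", "flash_loan"]]

-- A's 'for group in related_groups: if cat1 in group and cat2 in group: return True' loop
def pvLoopA (cat1 cat2 : String) : List (PySem.Set String) → Bool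
  | [] => false
  | g :: rest =>
      if PySem.Set.contains g cat1 && PySem.Set.contains g cat2 then true
      else pvLoopA cat1 cat2 rest

def categories_related_py (cat1 : String) (cat2 : String) : Bool :=
  pvLoopA cat1 cat2 pvRelatedGroups

-- ===== PORT B =====
-- B's groups literal (tuples, modelled as lists)
def pvGroupsB : List (List String) :=
  [["reentrancy", "unchecked_low_level_calls"],
   ["access_control", "tx-origin"],
   ["bad_randomness", "time_manipulation"],
   ["oracle_manipulation", "price_manipulation", "flash_loan"]]

-- B's 'for gid, group in enumerate(groups): for c in group: cat_to_group[c] = gid'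
def pvCatToGroup : PySem.Dict String Int :=
  (PySem.List.enumerate pvGroupsB).foldl
    (fun d p => p.2.foldl (fun d c => d.insert c p.1) d) PySem.Dict.empty

-- 'g1 = cat_to_group.get(cat1); return g1 is not None and g1 == cat_to_group.get(cat2)'
def categories_related_py_alt (cat1 : String) (cat2 : String) : Bool :=
  match pvCatToGroup.get? cat1 with
  | none => false
  | some g1 => some g1 == pvCatToGroup.get? cat2

-- ===== PRECONDITION & SPEC =====
def Spec_categories_related_py (cat1 : String) (cat2 : String) (out : Bool) : Prop := out = categories_related_py_alt cat1 cat2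
instance (cat1 : String) (cat2 : String) (out : Bool) : Decidable (Spec_categories_related_py cat1 cat2 out) := by unfold Spec_categories_related_py; infer_instance

-- ===== CLAIM (what is proved, stated in full; the proofs are below) =====
def Claim_equal_categories_related_py : Prop := ∀ (cat1 : String) (cat2 : String), Dom_categories_related_py cat1 cat2 → Spec_categories_related_py cat1 cat2 (categories_related_py cat1 cat2)

-- ===== LEMMAS AND PROOFS =====
-- the index B builds, written out as a literal association list
def pvD : PySem.Dict String Int := PySem.Dict.mk
    [("reentrancy", 0), ("unchecked_low_level_calls", 0),
     ("access_control", 1), ("tx-origin", 1),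
     ("bad_randomness", 2), ("time_manipulation", 2),
     ("oracle_manipulation", 3), ("price_manipulation", 3), ("flash_loan", 3)]

set_option maxHeartbeats 1000000 in
theorem pvCatToGroup_eq : pvCatToGroup = pvD := by
  simp [pvCatToGroup, pvGroupsB, pvD, PySem.List.enumerate, PySem.Dict.insert, PySem.Dict.empty]

theorem pvGroups_eval : pvRelatedGroups =
    [["reentrancy", "unchecked_low_level_calls"],
     ["access_control", "tx-origin"],
     ["bad_randomness", "time_manipulation"],
     ["oracle_manipulation", "price_manipulation", "flash_loan"]] := by decide

-- every value stored in the index is one of the four group ids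
theorem pvRange : ∀ (c : String) (v : Int), pvD.get? c = some v → v = 0 ∨ v = 1 ∨ v = 2 ∨ v = 3 := by
  intro c v h
  simp only [pvD, PySem.Dict.get?_mk_cons] at h
  split_ifs at h <;> simp_all [PySem.Dict.get?]

-- membership in each of A's four groups, characterised by the index B builds
theorem pvMem0 (c : String) : ((c == "reentrancy") || (c == "unchecked_low_level_calls")) = (pvD.get? c == some 0) := by
  simp only [pvD, PySem.Dict.get?_mk_cons]
  split_ifs <;>
    first
      | (rename_i h; obtain rfl := eq_of_beq h; decide)
      | simp_all [ne_comm, PySem.Dict.get?]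

theorem pvMem1 (c : String) : ((c == "access_control") || (c == "tx-origin")) = (pvD.get? c == some 1) := by
  simp only [pvD, PySem.Dict.get?_mk_cons]
  split_ifs <;>
    first
      | (rename_i h; obtain rfl := eq_of_beq h; decide)
      | simp_all [ne_comm, PySem.Dict.get?]

theorem pvMem2 (c : String) : ((c == "bad_randomness") || (c == "time_manipulation")) = (pvD.get? c == some 2) := by
  simp only [pvD, PySem.Dict.get?_mk_cons]
  split_ifs <;>
    first
      | (rename_i h; obtain rfl := eq_of_beq h; decide)
      | simp_all [ne_comm, PySem.Dict.get?]

theorem pvMem3 (c : String) : ((c == "oracle_manipulation") || ((c == "price_manipulation") || (c == "flash_loan"))) = (pvD.get? c == some 3) := by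
  simp only [pvD, PySem.Dict.get?_mk_cons]
  split_ifs <;>
    first
      | (rename_i h; obtain rfl := eq_of_beq h; decide)
      | simp_all [ne_comm, PySem.Dict.get?]

-- ===== VERDICT (by name: the statement is the Claim_ definition above) =====
theorem categories_related_py_spec : Claim_equal_categories_related_py := by
  intro cat1 cat2 _
  unfold Spec_categories_related_py categories_related_py categories_related_py_alt
  rw [pvCatToGroup_eq, pvGroups_eval]
  simp only [pvLoopA, PySem.Set.contains, List.contains_cons, List.contains_nil, Bool.or_false]
  rw [pvMem0 cat1, pvMem0 cat2, pvMem1 cat1, pvMem1 cat2, pvMem2 cat1, pvMem2 cat2,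
      pvMem3 cat1, pvMem3 cat2]
  cases hg1 : pvD.get? cat1 with
  | none => simp
  | some a =>
      cases hg2 : pvD.get? cat2 with
      | none => rcases pvRange cat1 a hg1 with rfl | rfl | rfl | rfl <;> simp
      | some b =>
          rcases pvRange cat1 a hg1 with rfl | rfl | rfl | rfl <;>
          rcases pvRange cat2 b hg2 with rfl | rfl | rfl | rfl <;> simp
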